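-- pv_equiv track=rewrite | github.com/nofaceinbook/muxp | muxp_area.py | replace_vertex_in_poly
-- ===== SOURCE A (Python) =====
-- def replace_vertex_in_poly(oldv, newv, poly):
--     """
--     Replaces in list of vertices in poly all vertices (x,y) that match oldv with newv.
--     In case newv was already in the list, this occurrence is left out. Updated poly is returned.
--     """
--     replaced = False
--     new_poly = []
--     for v in poly:
--         if v[0] == oldv[0] and v[1] == oldv[1] and not replaced:
--             new_poly.append(newv)
--             replaced = True
--         elif v[0] != newv[0] or v[1] != newv[1]:
--             new_poly.append(v)
--     return new_poly
-- ===== SOURCE B (Python) =====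
-- def replace_vertex_in_poly(oldv, newv, poly):
--     idx = next((i for i, v in enumerate(poly)
--                 if v[0] == oldv[0] and v[1] == oldv[1]), None)
--     new_poly = []
--     for i, v in enumerate(poly):
--         if i == idx:
--             new_poly.append(newv)
--         elif v[0] != newv[0] or v[1] != newv[1]:
--             new_poly.append(v)
--     return new_poly
-- ===== Notes on version B (the rewrite author's own statement) =====
-- stated objective: alternative
-- what changed: Replaces A's stateful 'replaced' flag with a separate pre-scan that finds the index of the first oldv match on the original list, followed by a stateless positional pass that places newv at that index and drops duplicates of newv elsewhere.
import Mathlib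
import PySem

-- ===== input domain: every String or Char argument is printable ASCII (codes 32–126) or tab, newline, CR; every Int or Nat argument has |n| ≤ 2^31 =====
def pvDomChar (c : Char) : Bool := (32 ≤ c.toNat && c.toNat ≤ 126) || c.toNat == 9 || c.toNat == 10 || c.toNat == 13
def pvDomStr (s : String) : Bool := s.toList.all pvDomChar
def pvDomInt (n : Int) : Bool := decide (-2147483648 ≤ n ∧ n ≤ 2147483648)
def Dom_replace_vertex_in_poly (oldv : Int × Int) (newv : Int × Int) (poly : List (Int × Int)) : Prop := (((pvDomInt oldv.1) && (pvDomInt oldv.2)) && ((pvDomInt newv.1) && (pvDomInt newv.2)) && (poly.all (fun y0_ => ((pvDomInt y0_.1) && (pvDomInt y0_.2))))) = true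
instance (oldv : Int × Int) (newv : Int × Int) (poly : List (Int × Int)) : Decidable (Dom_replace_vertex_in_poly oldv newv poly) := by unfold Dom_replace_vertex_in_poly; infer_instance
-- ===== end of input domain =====

-- B replaces A's stateful 'replaced' flag by a pre-scan for the index of the first oldv
-- match plus a stateless positional pass (alternative decomposition, same cost).

-- ===== PORT A =====
-- A's loop over poly carrying the 'replaced' flag, as the obvious structural recursion.
def pvA_loop (oldv : Int × Int) (newv : Int × Int) (replaced : Bool) : List (Int × Int) → List (Int × Int)
  | [] => []
  | v :: rest =>
    if (v.1 = oldv.1 ∧ v.2 = oldv.2) ∧ replaced = false then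
      newv :: pvA_loop oldv newv true rest
    else if v.1 ≠ newv.1 ∨ v.2 ≠ newv.2 then
      v :: pvA_loop oldv newv replaced rest
    else
      pvA_loop oldv newv replaced rest

def replace_vertex_in_poly (oldv : Int × Int) (newv : Int × Int) (poly : List (Int × Int)) : List (Int × Int) :=
  pvA_loop oldv newv false poly

-- ===== PORT B =====
-- pre-scan: next((i for i, v in enumerate(poly) if v[0]==oldv[0] and v[1]==oldv[1]), None)
def pvB_firstIdx (oldv : Int × Int) : List (Int × Int) → Nat → Option Nat
  | [], _ => none
  | v :: rest, i =>
    if v.1 = oldv.1 ∧ v.2 = oldv.2 then some i else pvB_firstIdx oldv rest (i + 1)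

-- positional pass: at i == idx append newv, else keep v unless it equals newv
def pvB_pass (newv : Int × Int) (idx : Option Nat) : List (Int × Int) → Nat → List (Int × Int)
  | [], _ => []
  | v :: rest, i =>
    if some i = idx then
      newv :: pvB_pass newv idx rest (i + 1)
    else if v.1 ≠ newv.1 ∨ v.2 ≠ newv.2 then
      v :: pvB_pass newv idx rest (i + 1)
    else
      pvB_pass newv idx rest (i + 1)

def replace_vertex_in_poly_alt (oldv : Int × Int) (newv : Int × Int) (poly : List (Int × Int)) : List (Int × Int) :=
  pvB_pass newv (pvB_firstIdx oldv poly 0) poly 0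

-- ===== PRECONDITION & SPEC =====
def Spec_replace_vertex_in_poly (oldv : Int × Int) (newv : Int × Int) (poly : List (Int × Int)) (out : List (Int × Int)) : Prop := out = replace_vertex_in_poly_alt oldv newv poly
instance (oldv : Int × Int) (newv : Int × Int) (poly : List (Int × Int)) (out : List (Int × Int)) : Decidable (Spec_replace_vertex_in_poly oldv newv poly out) := by unfold Spec_replace_vertex_in_poly; infer_instance

-- ===== CLAIM (what is proved, stated in full; the proofs are below) =====
def Claim_equal_replace_vertex_in_poly : Prop := ∀ (oldv : Int × Int) (newv : Int × Int) (poly : List (Int × Int)), Dom_replace_vertex_in_poly oldv newv poly → Spec_replace_vertex_in_poly oldv newv poly (replace_vertex_in_poly oldv newv poly)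

-- ===== LEMMAS AND PROOFS =====

theorem pvB_firstIdx_ge (oldv : Int × Int) :
    ∀ (l : List (Int × Int)) (i k : Nat), pvB_firstIdx oldv l i = some k → i ≤ k := by
  intro l
  induction l with
  | nil => intro i k h; simp [pvB_firstIdx] at h
  | cons v rest ih =>
    intro i k h
    by_cases hv : v.1 = oldv.1 ∧ v.2 = oldv.2
    · simp [pvB_firstIdx, hv] at h; omega
    · simp [pvB_firstIdx, hv] at h
      have := ih (i + 1) k h
      omega

-- after the replacement has happened, A just filters out newv; B does the same
-- once the counter has passed idx
theorem pv_past (oldv newv : Int × Int) :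
    ∀ (l : List (Int × Int)) (i : Nat) (idx : Option Nat),
      (∀ j, idx = some j → j < i) → pvB_pass newv idx l i = pvA_loop oldv newv true l := by
  intro l
  induction l with
  | nil => intro i idx _; simp [pvB_pass, pvA_loop]
  | cons v rest ih =>
    intro i idx h
    have hne : ¬ some i = idx := by
      intro he
      have := h i he.symm
      omega
    have hrec : pvB_pass newv idx rest (i + 1) = pvA_loop oldv newv true rest := by
      apply ih
      intro j hj
      have := h j hj
      omega
    by_cases hn : v.1 ≠ newv.1 ∨ v.2 ≠ newv.2
    · simp [pvB_pass, pvA_loop, hne, hn, hrec]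
    · simp [pvB_pass, pvA_loop, hne, hn, hrec]

theorem pv_main (oldv newv : Int × Int) :
    ∀ (l : List (Int × Int)) (i : Nat),
      pvB_pass newv (pvB_firstIdx oldv l i) l i = pvA_loop oldv newv false l := by
  intro l
  induction l with
  | nil => intro i; simp [pvB_pass, pvA_loop]
  | cons v rest ih =>
    intro i
    by_cases hv : v.1 = oldv.1 ∧ v.2 = oldv.2
    · have hidx : pvB_firstIdx oldv (v :: rest) i = some i := by simp [pvB_firstIdx, hv]
      have hrest : pvB_pass newv (some i) rest (i + 1) = pvA_loop oldv newv true rest := by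
        apply pv_past
        intro j hj
        cases hj
        omega
      simp [hidx, pvB_pass, pvA_loop, hv, hrest]
    · have hidx : pvB_firstIdx oldv (v :: rest) i = pvB_firstIdx oldv rest (i + 1) := by
        simp [pvB_firstIdx, hv]
      have hne : ¬ some i = pvB_firstIdx oldv rest (i + 1) := by
        intro he
        have := pvB_firstIdx_ge oldv rest (i + 1) i he.symm
        omega
      by_cases hn : v.1 ≠ newv.1 ∨ v.2 ≠ newv.2
      · simp [pvB_pass, pvA_loop, hidx, hne, hv, hn, ih (i + 1)]
      · simp [pvB_pass, pvA_loop, hidx, hne, hv, hn, ih (i + 1)]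

-- ===== VERDICT (by name: the statement is the Claim_ definition above) =====
theorem replace_vertex_in_poly_spec : Claim_equal_replace_vertex_in_poly := by
  intro oldv newv poly _
  unfold Spec_replace_vertex_in_poly replace_vertex_in_poly replace_vertex_in_poly_alt
  exact (pv_main oldv newv poly 0).symm
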